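-- pv_equiv track=rewrite | github.com/josh2112/pcjr-asm-game-tools | tools/vectorize/vectorize.py | plotLineLow
-- ===== SOURCE A (Python) =====
-- def plotLineLow( x0, y0, x1, y1 ):
--     dx, dy, yi = x1 - x0, y1 - y0, 1
--     if dy < 0:
--         dy, yi = -dy, -1
--     y, D = y0, 2*dy - dx
--     pts = []
--     for x in range( x0, x1+1 ):
--         pts += [(x,y)]
--         if D > 0:
--             y = y + yi
--             D = D - 2*dx
--         D = D + 2*dy
--     return pts
-- ===== SOURCE B (Python) =====
-- def plotLineLow(x0, y0, x1, y1):
--     # Closed-form per-point rounding instead of the incremental error term.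
--     # y advances at most one per column (min clamp), matching the low-slope loop.
--     dx = x1 - x0
--     if y1 < y0:
--         dy, yi = y0 - y1, -1
--     else:
--         dy, yi = y1 - y0, 1
--     if x0 == x1:
--         return [(x0, y0)]
--     return [(x0 + k, y0 + yi * min(k, (2 * dy * k + dx - 1) // (2 * dx)))
--             for k in range(dx + 1)]
-- ===== Notes on version B (the rewrite author's own statement) =====
-- stated objective: alternative
-- what changed: Replaces A's stateful incremental error-term (D) loop by a per-column closed-form: each y is computed directly as y0 + yi*min(k, (2*dy*k + dx - 1)//(2*dx)), with a guard for the single-point x0 == x1 case.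
import Mathlib
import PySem

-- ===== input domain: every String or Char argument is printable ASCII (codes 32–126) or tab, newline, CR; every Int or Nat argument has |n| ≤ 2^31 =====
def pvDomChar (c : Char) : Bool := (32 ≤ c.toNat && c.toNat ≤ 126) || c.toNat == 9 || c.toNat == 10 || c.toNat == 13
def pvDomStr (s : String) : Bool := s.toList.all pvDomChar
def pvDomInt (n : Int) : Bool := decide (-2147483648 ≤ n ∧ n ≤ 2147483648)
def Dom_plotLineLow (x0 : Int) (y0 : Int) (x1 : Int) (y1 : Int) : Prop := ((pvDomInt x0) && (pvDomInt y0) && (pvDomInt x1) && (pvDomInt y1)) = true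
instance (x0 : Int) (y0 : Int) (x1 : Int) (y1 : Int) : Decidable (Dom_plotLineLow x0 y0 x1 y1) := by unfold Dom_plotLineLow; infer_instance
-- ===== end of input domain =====

-- B replaces A's incremental Bresenham error term by a direct per-column
-- floor-division rounding formula (alternative decomposition, same cost).

-- ===== PORT A =====
-- A's loop body: append the point, then bump y and the error term D when D > 0.
def pvStepA (dx : Int) (dy : Int) (yi : Int) (s : Int × Int × List (Int × Int)) (x : Int) :
    Int × Int × List (Int × Int) :=
  let pts := s.2.2 ++ [(x, s.1)]
  let p := if s.2.1 > 0 then (s.1 + yi, s.2.1 - 2*dx) else (s.1, s.2.1)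
  (p.1, p.2 + 2*dy, pts)

def plotLineLow (x0 : Int) (y0 : Int) (x1 : Int) (y1 : Int) : List (Int × Int) :=
  let dx := x1 - x0
  let dy := y1 - y0
  let p := if dy < 0 then (-dy, (-1 : Int)) else (dy, (1 : Int))
  ((PySem.List.pyRange x0 (x1+1)).foldl (pvStepA dx p.1 p.2) (y0, 2*p.1 - dx, [])).2.2

-- ===== PORT B =====
def plotLineLow_alt (x0 : Int) (y0 : Int) (x1 : Int) (y1 : Int) : List (Int × Int) :=
  let dx := x1 - x0
  let p := if y1 < y0 then (y0 - y1, (-1 : Int)) else (y1 - y0, (1 : Int))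
  if x0 = x1 then [(x0, y0)]
  else (PySem.List.pyRange 0 (dx+1)).map (fun k =>
    (x0 + k, y0 + p.2 * min k (PySem.Int.floordiv (2*p.1*k + dx - 1) (2*dx))))

-- ===== PRECONDITION & SPEC =====
def Spec_plotLineLow (x0 : Int) (y0 : Int) (x1 : Int) (y1 : Int) (out : List (Int × Int)) : Prop := out = plotLineLow_alt x0 y0 x1 y1
instance (x0 : Int) (y0 : Int) (x1 : Int) (y1 : Int) (out : List (Int × Int)) : Decidable (Spec_plotLineLow x0 y0 x1 y1 out) := by unfold Spec_plotLineLow; infer_instance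

-- ===== CLAIM (what is proved, stated in full; the proofs are below) =====
def Claim_equal_plotLineLow : Prop := ∀ (x0 : Int) (y0 : Int) (x1 : Int) (y1 : Int), Dom_plotLineLow x0 y0 x1 y1 → Spec_plotLineLow x0 y0 x1 y1 (plotLineLow x0 y0 x1 y1)

-- ===== LEMMAS AND PROOFS =====

-- B's per-column y-offset after k columns.
def pvG (dx : Int) (dy : Int) (k : Int) : Int :=
  min k (PySem.Int.floordiv (2*dy*k + dx - 1) (2*dx))

theorem pvG_zero (dx : Int) (dy : Int) (hdx : 1 ≤ dx) : pvG dx dy 0 = 0 := by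
  have h : PySem.Int.floordiv (2*dy*0 + dx - 1) (2*dx) = 0 :=
    (PySem.Int.floordiv_eq_iff_of_pos (by omega)).mpr (by constructor <;> nlinarith)
  rw [pvG, h]
  simp

-- One step of B's closed form matches one pass of A's loop body.
theorem pvG_step (dx : Int) (dy : Int) (k : Int) (hdx : 1 ≤ dx) (hdy : 0 ≤ dy) (hk : 0 ≤ k) :
    pvG dx dy (k+1) = pvG dx dy k + (if 2*dy*(k+1) - dx - 2*dx*(pvG dx dy k) > 0 then 1 else 0) := by
  have hb : (0:Int) < 2*dx := by omega
  have hbnd := (PySem.Int.floordiv_eq_iff_of_pos (a := 2*dy*k + dx - 1) (q := PySem.Int.floordiv (2*dy*k + dx - 1) (2*dx)) hb).mp rfl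
  set q := PySem.Int.floordiv (2*dy*k + dx - 1) (2*dx) with hq
  obtain ⟨h1, h2⟩ := hbnd
  by_cases hsl : dy ≤ dx
  · have hqk : q ≤ k := by nlinarith
    have hgk : pvG dx dy k = q := min_eq_right hqk
    rw [hgk]
    split_ifs with hD
    · have hf : PySem.Int.floordiv (2*dy*(k+1) + dx - 1) (2*dx) = q + 1 :=
        (PySem.Int.floordiv_eq_iff_of_pos hb).mpr ⟨by nlinarith, by nlinarith⟩
      rw [pvG, hf]
      exact min_eq_right (by omega)
    · have hf : PySem.Int.floordiv (2*dy*(k+1) + dx - 1) (2*dx) = q :=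
        (PySem.Int.floordiv_eq_iff_of_pos hb).mpr ⟨by nlinarith, by nlinarith⟩
      rw [pvG, hf]
      simpa using min_eq_right (by omega : q ≤ k + 1)
  · have hkq : k ≤ q := by nlinarith
    have hgk : pvG dx dy k = k := min_eq_left hkq
    rw [hgk, if_pos (by nlinarith)]
    have hk1 : k + 1 ≤ PySem.Int.floordiv (2*dy*(k+1) + dx - 1) (2*dx) := by
      rw [PySem.Int.le_floordiv_iff_mul_le hb]
      nlinarith
    exact min_eq_left hk1

-- Loop invariant for A's fold: after m columns the state is
-- (y0 + yi·G(m), 2·dy·(m+1) − dx − 2·dx·G(m), the first m points of B's map).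
theorem pvFoldA (x0 : Int) (y0 : Int) (dx : Int) (dy : Int) (yi : Int)
    (hdx : 1 ≤ dx) (hdy : 0 ≤ dy) (m : Nat) :
    (PySem.List.pyRange x0 (x0 + (m:Int))).foldl (pvStepA dx dy yi) (y0, 2*dy - dx, []) =
      (y0 + yi * pvG dx dy (m:Int), 2*dy*((m:Int)+1) - dx - 2*dx*(pvG dx dy (m:Int)),
       (List.range m).map (fun (j : Nat) => (x0 + (j:Int), y0 + yi * pvG dx dy (j:Int)))) := by
  induction m with
  | zero =>
    simp only [Nat.cast_zero, add_zero, PySem.List.pyRange_one_eq_nil le_rfl, List.foldl_nil,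
      List.range_zero, List.map_nil, pvG_zero dx dy hdx]
    refine Prod.ext (by ring) (Prod.ext (by ring) rfl)
  | succ m ih =>
    rw [show x0 + ((m+1:Nat):Int) = (x0 + (m:Int)) + 1 by push_cast; ring,
        PySem.List.pyRange_one_succ_right (by omega), List.foldl_append, ih]
    have hstep := pvG_step dx dy (m:Int) hdx hdy (by positivity)
    have hcast : ((m+1:Nat):Int) = (m:Int) + 1 := by push_cast; ring
    simp only [List.foldl_cons, List.foldl_nil, pvStepA, List.range_succ, List.map_append,
      List.map_cons, List.map_nil, hcast, hstep]
    by_cases hD : 2*dy*((m:Int)+1) - dx - 2*dx*(pvG dx dy (m:Int)) > 0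
    · simp only [if_pos hD]
      refine Prod.ext (by ring) (Prod.ext (by ring) rfl)
    · simp only [if_neg hD]
      refine Prod.ext (by ring) (Prod.ext (by ring) rfl)

theorem pvMain (x0 : Int) (y0 : Int) (x1 : Int) (dy : Int) (yi : Int)
    (hdy : 0 ≤ dy) :
    ((PySem.List.pyRange x0 (x1+1)).foldl (pvStepA (x1-x0) dy yi) (y0, 2*dy - (x1-x0), [])).2.2 =
      (if x0 = x1 then [(x0, y0)]
       else (PySem.List.pyRange 0 ((x1-x0)+1)).map (fun k =>
         (x0 + k, y0 + yi * min k (PySem.Int.floordiv (2*dy*k + (x1-x0) - 1) (2*(x1-x0)))))) := by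
  rcases lt_trichotomy x1 x0 with hlt | heq | hgt
  · rw [PySem.List.pyRange_one_eq_nil (by omega), if_neg (by omega),
        PySem.List.pyRange_one_eq_nil (by omega)]
    simp
  · subst heq
    rw [if_pos rfl, PySem.List.pyRange_one_succ_right le_rfl,
        PySem.List.pyRange_one_eq_nil le_rfl]
    simp [pvStepA]
  · have hdx : 1 ≤ x1 - x0 := by omega
    set m : Nat := (x1 + 1 - x0).toNat with hm
    have hmc : (m:Int) = x1 + 1 - x0 := Int.toNat_of_nonneg (by omega)
    rw [if_neg (by omega), show x1 + 1 = x0 + (m:Int) by omega,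
        pvFoldA x0 y0 (x1-x0) dy yi hdx hdy m,
        show (x1-x0)+1 = (m:Int) by omega, PySem.List.pyRange_zero_natCast, List.map_map]
    simp [pvG, Function.comp]

-- ===== VERDICT (by name: the statement is the Claim_ definition above) =====
theorem plotLineLow_spec : Claim_equal_plotLineLow := by
  intro x0 y0 x1 y1 _
  unfold Spec_plotLineLow plotLineLow plotLineLow_alt
  dsimp only
  by_cases hy : y1 < y0
  · rw [if_pos (by omega : y1 - y0 < 0), if_pos hy]
    simpa [neg_sub] using pvMain x0 y0 x1 (y0 - y1) (-1) (by omega)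
  · rw [if_neg (by omega : ¬ y1 - y0 < 0), if_neg hy]
    exact pvMain x0 y0 x1 (y1 - y0) 1 (by omega)
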